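-- pv_equiv track=rewrite | github.com/theospears/SiriServerCore | languageutils.py | getCompatibleCodes
-- ===== SOURCE A (Python) =====
-- def getCompatibleCodes(language):
--     languages = list()
--     while True:
--         languages.append(language)
--         if '-' not in language:
--             break
--         language = language[:language.rfind('-')]
--     return languages
-- ===== SOURCE B (Python) =====
-- def getCompatibleCodes(language):
--     codes = []
--     prefix = ''
--     for ch in language:
--         if ch == '-':
--             codes.append(prefix)
--         prefix += ch
--     codes.append(language)
--     codes.reverse()
--     return codes
-- ===== Notes on version B (the rewrite author's own statement) =====
-- stated objective: alternative
-- what changed: B replaces the repeated rfind-and-slice loop (rescanning the ever-shorter string each round) with a single forward pass that records the prefix before each hyphen and reverses the collected list.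
import Mathlib
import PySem

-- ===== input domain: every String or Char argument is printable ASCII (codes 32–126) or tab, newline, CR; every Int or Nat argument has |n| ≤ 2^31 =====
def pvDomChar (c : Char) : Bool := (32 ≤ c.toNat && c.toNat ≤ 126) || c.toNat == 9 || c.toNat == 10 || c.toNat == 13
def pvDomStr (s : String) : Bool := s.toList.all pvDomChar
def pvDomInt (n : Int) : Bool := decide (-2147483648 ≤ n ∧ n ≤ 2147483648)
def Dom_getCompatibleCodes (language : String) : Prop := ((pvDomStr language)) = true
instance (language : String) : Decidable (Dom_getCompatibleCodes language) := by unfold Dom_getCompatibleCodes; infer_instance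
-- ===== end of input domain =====

-- B replaces A's repeated rfind-and-slice loop with one forward pass collecting the prefix
-- before each hyphen and reversing the collected list (objective: alternative single-pass algorithm).

-- ===== PORT A =====
-- The lemmas before the port are exactly what its `decreasing_by` cites (the trimmed string is shorter).

-- decomposition of a string at its LAST '-'
theorem pv_exists_last_dash (cs : List Char) (h : '-' ∈ cs) :
    ∃ a b : List Char, cs = a ++ '-' :: b ∧ '-' ∉ b := by
  induction cs with
  | nil => cases h
  | cons c t ih =>
    by_cases ht : '-' ∈ t
    · obtain ⟨a, b, rfl, hb⟩ := ih ht
      exact ⟨c :: a, b, rfl, hb⟩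
    · have hc : c = '-' := by
        rcases List.mem_cons.mp h with h' | h'
        · exact h'.symm
        · exact absurd h' ht
      exact ⟨[], t, by simp [hc], ht⟩

theorem pv_rfind_go_last_dash (a b : List Char) (hb : '-' ∉ b) :
    ∀ n, a.length ≤ n → PySem.Chars.rfind.go (a ++ '-' :: b) ['-'] n = (a.length : Int) := by
  intro n
  induction n with
  | zero =>
    intro hn
    have ha : a = [] := List.eq_nil_of_length_eq_zero (Nat.le_zero.mp hn)
    subst ha
    simp [PySem.Chars.rfind.go, List.isPrefixOf]
  | succ j ih =>
    intro hn
    rcases Nat.lt_or_ge j a.length with hj | hj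
    · -- a.length = j + 1 : the dash is found exactly here
      have hend : a.length = j + 1 := by omega
      have hdrop : (a ++ '-' :: b).drop (j + 1) = '-' :: b := by
        rw [← hend]; simp
      simp [PySem.Chars.rfind.go, hdrop, List.isPrefixOf, hend]
    · -- j + 1 > a.length : no dash at position j + 1, recurse
      have hpre : ['-'].isPrefixOf ((a ++ '-' :: b).drop (j + 1)) = false := by
        by_contra hcon
        have htrue : ['-'].isPrefixOf ((a ++ '-' :: b).drop (j + 1)) = true := by
          cases hx : ['-'].isPrefixOf ((a ++ '-' :: b).drop (j + 1)) with
          | false => exact absurd hx hcon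
          | true => rfl
        have hmem : '-' ∈ (a ++ '-' :: b).drop (j + 1) := by
          rcases List.isPrefixOf_iff_prefix.mp htrue with ⟨t, ht⟩
          rw [← ht]; simp
        have e1 : (a ++ '-' :: b).drop (a.length + 1) = b := by
          rw [show a ++ '-' :: b = (a ++ ['-']) ++ b by simp,
            show a.length + 1 = (a ++ ['-']).length by simp]
          simp
        have hsplit : (a ++ '-' :: b).drop (j + 1) = b.drop (j + 1 - (a.length + 1)) := by
          rw [← e1, List.drop_drop]
          congr 1
          · omega
          · rw [e1]
        rw [hsplit] at hmem
        exact hb (List.mem_of_mem_drop hmem)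
      simp only [PySem.Chars.rfind.go, hpre, Bool.false_eq_true, if_false]
      exact ih hj

theorem pv_rfind_last_dash (a b : List Char) (hb : '-' ∉ b) :
    PySem.Chars.rfind (a ++ '-' :: b) ['-'] = (a.length : Int) := by
  unfold PySem.Chars.rfind
  exact pv_rfind_go_last_dash a b hb _ (by simp)

theorem pv_slice_last_dash (a b : List Char) :
    PySem.Chars.slice (a ++ '-' :: b) none (some (a.length : Int)) = a := by
  simp [PySem.Chars.slice, PySem.List.slice, PySem.List.clampIdx]

theorem pv_isIn_dash (cs : List Char) : PySem.Chars.isIn ['-'] cs = true ↔ '-' ∈ cs := by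
  rw [PySem.Chars.isIn_iff_infix]
  exact List.singleton_infix_iff '-' cs

theorem pv_trim_lt (cs : List Char) (h : PySem.Chars.isIn ['-'] cs = true) :
    (PySem.Chars.slice cs none (some (PySem.Chars.rfind cs ['-']))).length < cs.length := by
  obtain ⟨a, b, rfl, hb⟩ := pv_exists_last_dash cs ((pv_isIn_dash cs).mp h)
  rw [pv_rfind_last_dash a b hb, pv_slice_last_dash a b]
  simp

-- while True: append language; break if no '-'; language = language[:language.rfind('-')]
def getCompatibleCodesGo (cs : List Char) : List (List Char) :=
  if h : PySem.Chars.isIn ['-'] cs = true then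
    cs :: getCompatibleCodesGo (PySem.Chars.slice cs none (some (PySem.Chars.rfind cs ['-'])))
  else
    [cs]
termination_by cs.length
decreasing_by exact pv_trim_lt cs h

def getCompatibleCodes (language : String) : List String :=
  (getCompatibleCodesGo language.toList).map String.mk

-- ===== PORT B =====
-- loop body: if ch == '-': codes.append(prefix); prefix += ch
def getCompatibleCodesAltStep (st : List (List Char) × List Char) (ch : Char) :
    List (List Char) × List Char :=
  if ch = '-' then (st.1 ++ [st.2], st.2 ++ [ch]) else (st.1, st.2 ++ [ch])

def getCompatibleCodes_alt (language : String) : List String :=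
  (((language.toList.foldl getCompatibleCodesAltStep ([], [])).1
      ++ [language.toList]).reverse).map String.mk

-- ===== PRECONDITION & SPEC =====
def Spec_getCompatibleCodes (language : String) (out : List String) : Prop := out = getCompatibleCodes_alt language
instance (language : String) (out : List String) : Decidable (Spec_getCompatibleCodes language out) := by unfold Spec_getCompatibleCodes; infer_instance

-- ===== CLAIM (what is proved, stated in full; the proofs are below) =====
def Claim_equal_getCompatibleCodes : Prop := ∀ (language : String), Dom_getCompatibleCodes language → Spec_getCompatibleCodes language (getCompatibleCodes language)

-- ===== LEMMAS AND PROOFS =====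

-- the prefixes recorded by B's pass: one (pre ++ cs-prefix) per '-' in cs, in order
def pvDashPrefixes (pre cs : List Char) : List (List Char) :=
  match cs with
  | [] => []
  | c :: t => (if c = '-' then [pre] else []) ++ pvDashPrefixes (pre ++ [c]) t

theorem pv_foldl_step (cs : List Char) : ∀ (acc : List (List Char)) (pre : List Char),
    cs.foldl getCompatibleCodesAltStep (acc, pre) = (acc ++ pvDashPrefixes pre cs, pre ++ cs) := by
  induction cs with
  | nil => intro acc pre; simp [pvDashPrefixes]
  | cons c t ih =>
    intro acc pre
    by_cases hc : c = '-' <;>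
      simp [getCompatibleCodesAltStep, hc, pvDashPrefixes, ih]

theorem pv_dashPrefixes_no_dash (cs : List Char) (h : '-' ∉ cs) :
    ∀ pre, pvDashPrefixes pre cs = [] := by
  induction cs with
  | nil => intro pre; rfl
  | cons c t ih =>
    intro pre
    have hc : ¬ c = '-' := fun hc => h (by simp [hc])
    have ht : '-' ∉ t := fun ht => h (List.mem_cons_of_mem c ht)
    simp [pvDashPrefixes, hc, ih ht]

theorem pv_dashPrefixes_last_dash (a : List Char) : ∀ (pre b : List Char), '-' ∉ b →
    pvDashPrefixes pre (a ++ '-' :: b) = pvDashPrefixes pre a ++ [pre ++ a] := by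
  induction a with
  | nil =>
    intro pre b hb
    simp [pvDashPrefixes, pv_dashPrefixes_no_dash b hb]
  | cons c t ih =>
    intro pre b hb
    simp only [List.cons_append, pvDashPrefixes, ih (pre ++ [c]) b hb, List.append_assoc,
      List.cons_append, List.nil_append]

theorem pv_go_eq (n : Nat) : ∀ cs : List Char, cs.length ≤ n →
    getCompatibleCodesGo cs = cs :: (pvDashPrefixes [] cs).reverse := by
  induction n with
  | zero =>
    intro cs hn
    have : cs = [] := List.eq_nil_of_length_eq_zero (Nat.le_zero.mp hn)
    subst this
    rw [getCompatibleCodesGo]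
    simp [pv_isIn_dash, pvDashPrefixes]
  | succ n ih =>
    intro cs hn
    rw [getCompatibleCodesGo]
    by_cases h : PySem.Chars.isIn ['-'] cs = true
    · obtain ⟨a, b, rfl, hb⟩ := pv_exists_last_dash cs ((pv_isIn_dash cs).mp h)
      rw [dif_pos h, pv_rfind_last_dash a b hb, pv_slice_last_dash a b]
      have hlt : a.length ≤ n := by
        have := hn; simp at this; omega
      rw [ih a hlt, pv_dashPrefixes_last_dash a [] b hb]
      simp
    · rw [dif_neg h]
      have hmem : '-' ∉ cs := fun hm => h ((pv_isIn_dash cs).mpr hm)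
      simp [pv_dashPrefixes_no_dash cs hmem]

-- ===== VERDICT (by name: the statement is the Claim_ definition above) =====
theorem getCompatibleCodes_spec : Claim_equal_getCompatibleCodes := by
  intro language _
  unfold Spec_getCompatibleCodes getCompatibleCodes getCompatibleCodes_alt
  rw [pv_foldl_step language.toList [] [], pv_go_eq language.toList.length language.toList le_rfl]
  simp
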